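-- pv_equiv track=rewrite | github.com/speeno/Delphi_portin_project | legacy_delphi_source/legacy_source/debug/extract_db_sql_references.py | strip_brace_comments
-- ===== SOURCE A (Python) =====
-- def strip_brace_comments(text: str) -> str:
--     """Remove Pascal { ... } comments (non-nested, greedy per segment)."""
--     out: list[str] = []
--     i, n = 0, len(text)
--     while i < n:
--         if text[i] == "{":
--             j = text.find("}", i + 1)
--             if j == -1:
--                 out.append(text[i:])
--                 break
--             i = j + 1
--             continue
--         out.append(text[i])
--         i += 1
--     return "".join(out)
-- ===== SOURCE B (Python) =====
-- def strip_brace_comments(text: str) -> str: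
--     """Remove Pascal { ... } comments (non-nested, greedy per segment)."""
--     *body, tail = text.split("}")
--     def keep(chunk: str) -> str:
--         i = chunk.find("{")
--         return chunk + "}" if i == -1 else chunk[:i]
--     return "".join(map(keep, body)) + tail
-- ===== Notes on version B (the rewrite author's own statement) =====
-- stated objective: simpler
-- what changed: Replaces A's stateful index/while scanner (char-by-char with find-from-i and break) by a stateless pass: split the text on the closing brace, keep of each non-final chunk only the part before its first opening brace (or the whole chunk plus its separator if brace-free), and keep the final chunk verbatim, which preserves unterminated comments.
import Mathlib
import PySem

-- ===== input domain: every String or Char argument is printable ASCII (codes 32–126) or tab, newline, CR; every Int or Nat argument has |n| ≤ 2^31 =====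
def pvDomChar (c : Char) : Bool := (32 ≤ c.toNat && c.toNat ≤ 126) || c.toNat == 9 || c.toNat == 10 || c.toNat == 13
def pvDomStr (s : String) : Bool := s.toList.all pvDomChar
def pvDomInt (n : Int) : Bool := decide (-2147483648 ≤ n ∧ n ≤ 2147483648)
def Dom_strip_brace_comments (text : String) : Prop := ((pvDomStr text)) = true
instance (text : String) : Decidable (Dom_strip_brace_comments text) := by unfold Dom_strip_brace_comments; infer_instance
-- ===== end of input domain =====

-- B replaces A's manual index/while scanner by a stateless split-on-'}' pass
-- (each chunk keeps only its part before the first '{'); objective: simpler.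

-- B replaces A's stateful index/while scanner by a stateless split-on-'}' pass
-- (each chunk keeps only its part before the first '{'); objective: simpler.

-- ===== PORT A =====
-- the while loop over the index i, transcribed as recursion on the suffix text[i:]:
--   text[i] == "{"            -> head check
--   text.find("}", i+1)       -> findIdx? on the rest
--   j == -1: append text[i:]  -> none branch returns the whole suffix
--   i = j+1; continue         -> recurse on rest.drop (j+1)
--   out.append(text[i]); i+=1 -> cons the head and recurse on the rest
def pvALoop (cs : List Char) : List Char :=
  match cs with
  | [] => []
  | c :: rest =>
    if c = '{' then
      match rest.findIdx? (· == '}') with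
      | none => c :: rest
      | some j => pvALoop (rest.drop (j + 1))
    else c :: pvALoop rest
termination_by cs.length
decreasing_by all_goals (simp only [List.length_drop, List.length_cons]; omega)


def strip_brace_comments (text : String) : String :=
  String.ofList (pvALoop text.toList)

-- ===== PORT B =====
-- keep(chunk): i = chunk.find("{"); return chunk + "}" if i == -1 else chunk[:i]
def pvKeep (chunk : List Char) : List Char :=
  match chunk.findIdx? (· == '{') with
  | none => chunk ++ ['}']
  | some i => chunk.take i

-- '"".join(map(keep, body)) + tail' for '*body, tail = text.split("}")':
-- every part but the last goes through keep and is joined, the last is appended verbatim.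
def pvJoinTail (parts : List (List Char)) : List Char :=
  match parts with
  | [] => []
  | [p] => p
  | p :: ps => pvKeep p ++ pvJoinTail ps


def strip_brace_comments_alt (text : String) : String :=
  String.ofList (pvJoinTail (text.toList.splitOn '}'))

-- ===== PRECONDITION & SPEC =====
def Spec_strip_brace_comments (text : String) (out : String) : Prop := out = strip_brace_comments_alt text
instance (text : String) (out : String) : Decidable (Spec_strip_brace_comments text out) := by unfold Spec_strip_brace_comments; infer_instance

-- ===== CLAIM (what is proved, stated in full; the proofs are below) =====
def Claim_equal_strip_brace_comments : Prop := ∀ (text : String), Dom_strip_brace_comments text → Spec_strip_brace_comments text (strip_brace_comments text)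

-- ===== LEMMAS AND PROOFS =====

theorem pvALoop_nil : pvALoop [] = [] := by rw [pvALoop]
theorem pvALoop_cons (a : Char) (ys : List Char) : pvALoop (a :: ys) =
    (if a = '{' then
      match ys.findIdx? (· == '}') with
      | none => a :: ys
      | some j => pvALoop (ys.drop (j + 1))
    else a :: pvALoop ys) := by rw [pvALoop]

theorem pv_splitOn_cons (a : Char) (l : List Char) :
    (a :: l).splitOn '}' =
      if a = '}' then [] :: l.splitOn '}' else (l.splitOn '}').modifyHead (a :: ·) := by
  simp only [List.splitOn, List.splitOnP_cons]
  split_ifs with h1 h2 <;> simp_all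
theorem pv_splitOn_ne_nil (l : List Char) : l.splitOn '}' ≠ [] := by
  simp [List.splitOn, List.splitOnP_ne_nil]

theorem pv_splitOn_no_sep (l : List Char) (h : '}' ∉ l) : l.splitOn '}' = [l] := by
  induction l with
  | nil => decide
  | cons a t ih =>
    simp only [List.mem_cons, not_or] at h
    rw [pv_splitOn_cons, if_neg (fun hh => h.1 hh.symm), ih h.2]
    rfl

theorem pv_splitOn_append (q zs : List Char) (h : '}' ∉ q) :
    (q ++ '}' :: zs).splitOn '}' = q :: zs.splitOn '}' := by
  induction q with
  | nil => rw [List.nil_append, pv_splitOn_cons, if_pos rfl]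
  | cons a t ih =>
    simp only [List.mem_cons, not_or] at h
    rw [List.cons_append, pv_splitOn_cons, if_neg (fun hh => h.1 hh.symm), ih h.2]
    rfl

theorem pv_keep_cons (a : Char) (p : List Char) (ha : a ≠ '{') :
    pvKeep (a :: p) = a :: pvKeep p := by
  unfold pvKeep
  rw [List.findIdx?_cons]
  have hb : (a == '{') = false := by simpa using ha
  rw [hb]
  simp only [if_false, Bool.false_eq_true]
  cases h : p.findIdx? (· == '{') <;> simp

theorem pv_findIdx?_some_split {p : Char → Bool} {l : List Char} {j : ℕ}
    (h : l.findIdx? p = some j) :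
    ∃ q zs, l = q ++ zs ∧ q.length = j ∧ (∀ x ∈ q, p x = false) ∧
      ∃ c zs', zs = c :: zs' ∧ p c = true := by
  induction l generalizing j with
  | nil => simp at h
  | cons a t ih =>
    rw [List.findIdx?_cons] at h
    by_cases hp : p a
    · have hj : j = 0 := by simp [hp] at h; omega
      subst hj
      exact ⟨[], a :: t, by simp, rfl, by simp, a, t, rfl, hp⟩
    · simp [hp] at h
      obtain ⟨j', hj', rfl⟩ := h
      obtain ⟨q, zs, rfl, hlen, hq, c, zs', hzs, hc⟩ := ih hj'
      refine ⟨a :: q, zs, by simp, by simp [hlen], ?_, c, zs', hzs, hc⟩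
      intro x hx
      rcases List.mem_cons.mp hx with hxa | hxq
      · subst hxa; simpa using hp
      · exact hq x hxq

theorem pv_join_cons (a : Char) (ys : List Char) (ha : a ≠ '{') (ha2 : a ≠ '}') :
    pvJoinTail ((a :: ys).splitOn '}') = a :: pvJoinTail (ys.splitOn '}') := by
  rw [pv_splitOn_cons, if_neg ha2]
  obtain ⟨p, ps, hps⟩ := List.exists_cons_of_ne_nil (pv_splitOn_ne_nil ys)
  rw [hps]
  cases ps with
  | nil => rfl
  | cons p2 ps2 =>
    show pvKeep (a :: p) ++ pvJoinTail (p2 :: ps2) = a :: (pvKeep p ++ pvJoinTail (p2 :: ps2))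
    rw [pv_keep_cons a p ha]
    simp

theorem pv_main : ∀ n (cs : List Char), cs.length ≤ n → pvALoop cs = pvJoinTail (cs.splitOn '}') := by
  intro n
  induction n with
  | zero =>
    intro cs h
    have : cs = [] := List.eq_nil_of_length_eq_zero (by omega)
    subst this
    rw [pvALoop_nil, pv_splitOn_no_sep _ (by simp)]
    rfl
  | succ n ih =>
    intro cs hlen
    cases cs with
    | nil => rw [pvALoop_nil, pv_splitOn_no_sep _ (by simp)]; rfl
    | cons a ys =>
      rw [pvALoop_cons]
      by_cases ha : a = '{'
      · subst ha
        rw [if_pos rfl]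
        cases hf : ys.findIdx? (· == '}') with
        | none =>
          have hnot : '}' ∉ ('{' :: ys) := by
            have h2 := List.findIdx?_eq_none_iff.mp hf
            intro hm
            rcases List.mem_cons.mp hm with h1 | h1
            · exact absurd h1.symm (by decide)
            · simpa using h2 '}' h1
          rw [pv_splitOn_no_sep _ hnot]
          rfl
        | some j =>
          obtain ⟨q, zstail, hys, hqlen, hq, c, zs', hzs, hc⟩ := pv_findIdx?_some_split hf
          subst hzs
          have hc' : c = '}' := by simpa using hc
          subst hc'
          subst hys
          have hqmem : '}' ∉ q := by
            intro hm
            exact absurd (hq '}' hm) (by decide)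
          have hdrop : (q ++ '}' :: zs').drop (j + 1) = zs' := by
            subst hqlen
            rw [show q ++ '}' :: zs' = (q ++ ['}']) ++ zs' by simp,
              show q.length + 1 = (q ++ ['}']).length by simp]
            exact List.drop_left
          show pvALoop ((q ++ '}' :: zs').drop (j + 1)) = _
          rw [hdrop]
          have hsplit : ('{' :: (q ++ '}' :: zs')).splitOn '}' = ('{' :: q) :: zs'.splitOn '}' := by
            have heq : ('{' :: q) ++ '}' :: zs' = '{' :: (q ++ '}' :: zs') := by simp
            rw [← heq, pv_splitOn_append _ _ (by simp [hqmem])]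
          rw [hsplit]
          obtain ⟨p, ps, hps⟩ := List.exists_cons_of_ne_nil (pv_splitOn_ne_nil zs')
          rw [hps]
          show pvALoop zs' = pvKeep ('{' :: q) ++ pvJoinTail (p :: ps)
          have hkeep : pvKeep ('{' :: q) = [] := by
            unfold pvKeep
            rw [List.findIdx?_cons]
            simp
          rw [hkeep, List.nil_append, ← hps]
          exact ih zs' (by simp at hlen ⊢; omega)
      · rw [if_neg ha]
        by_cases ha2 : a = '}'
        · subst ha2
          rw [pv_splitOn_cons, if_pos rfl]
          obtain ⟨p, ps, hps⟩ := List.exists_cons_of_ne_nil (pv_splitOn_ne_nil ys)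
          rw [hps]
          show '}' :: pvALoop ys = pvKeep [] ++ pvJoinTail (p :: ps)
          have hk : pvKeep [] = ['}'] := by decide
          rw [hk, ← hps, ih ys (by simp at hlen; omega)]
          rfl
        · rw [pv_join_cons a ys ha ha2, ih ys (by simp at hlen; omega)]

-- ===== VERDICT (by name: the statement is the Claim_ definition above) =====
theorem strip_brace_comments_spec : Claim_equal_strip_brace_comments := by
  intro text _
  show strip_brace_comments text = strip_brace_comments_alt text
  unfold strip_brace_comments strip_brace_comments_alt
  rw [pv_main text.toList.length text.toList le_rfl]
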